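-- pv_equiv track=rewrite | github.com/elon-choo/vibecodeallinone | kg-mcp-server/mcp_server/pipeline/auto_test_gen.py | _split_params_aware
-- ===== SOURCE A (Python) =====
-- from typing import Dict, Any, List, Optional
--
-- def _split_params_aware(args_str: str) -> List[str]:
--     """콤마로 파라미터를 분리하되 <> 내부의 콤마는 무시.
--
--     예: "items: Array<string>, config: Record<string, any>, limit: number"
--     → ["items: Array<string>", "config: Record<string, any>", "limit: number"]
--     """
--     parts = []
--     depth = 0
--     current = []
--     for ch in args_str:
--         if ch == "<":
--             depth += 1
--             current.append(ch)
--         elif ch == ">":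
--             depth -= 1
--             current.append(ch)
--         elif ch == "," and depth == 0:
--             parts.append("".join(current))
--             current = []
--         else:
--             current.append(ch)
--     if current:
--         parts.append("".join(current))
--     return parts
-- ===== SOURCE B (Python) =====
-- def _split_params_aware(args_str):
--     # pass 1: record indices of top-level commas
--     depth = 0
--     cuts = []
--     for i, ch in enumerate(args_str):
--         if ch == "<":
--             depth += 1
--         elif ch == ">":
--             depth -= 1
--         elif ch == "," and depth == 0:
--             cuts.append(i)
--     # pass 2: slice between the cuts
--     parts = []
--     prev = -1
--     for c in cuts:
--         parts.append(args_str[prev + 1:c])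
--         prev = c
--     tail = args_str[prev + 1:]
--     if tail:
--         parts.append(tail)
--     return parts
-- ===== Notes on version B (the rewrite author's own statement) =====
-- stated objective: alternative
-- what changed: Replaces the single character-accumulating loop with two passes: one that only records the indices of depth-0 commas, and a second that rebuilds the segments by string slicing between recorded cut points.
import Mathlib
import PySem

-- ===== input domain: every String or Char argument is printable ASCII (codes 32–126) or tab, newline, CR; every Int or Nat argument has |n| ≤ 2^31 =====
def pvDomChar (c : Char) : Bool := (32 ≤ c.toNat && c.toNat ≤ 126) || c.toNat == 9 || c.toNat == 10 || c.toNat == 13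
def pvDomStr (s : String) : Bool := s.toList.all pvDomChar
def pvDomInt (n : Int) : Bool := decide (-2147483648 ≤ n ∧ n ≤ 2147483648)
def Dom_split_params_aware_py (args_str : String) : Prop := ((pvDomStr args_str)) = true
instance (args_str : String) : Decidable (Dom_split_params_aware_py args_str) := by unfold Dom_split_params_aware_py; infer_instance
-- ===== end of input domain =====

-- B replaces A's single character-accumulating loop by two passes: record depth-0 comma
-- indices, then rebuild the segments by slicing between the cut points (objective: alternative).

-- ===== PORT A =====
-- A's loop: state (depth, current buffer, collected parts), one character at a time.
def pvALoop : List Char → Int → List Char → List String → List String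
  | [], _, cur, parts => if cur = [] then parts else parts ++ [String.ofList cur]
  | ch :: rest, depth, cur, parts =>
    if ch = '<' then pvALoop rest (depth + 1) (cur ++ [ch]) parts
    else if ch = '>' then pvALoop rest (depth - 1) (cur ++ [ch]) parts
    else if ch = ',' ∧ depth = 0 then pvALoop rest depth [] (parts ++ [String.ofList cur])
    else pvALoop rest depth (cur ++ [ch]) parts

def split_params_aware_py (args_str : String) : List String :=
  pvALoop args_str.toList 0 [] []

-- ===== PORT B =====
-- pass 1: indices of the commas seen at depth 0
def pvBCuts : List (Int × Char) → Int → List Int → List Int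
  | [], _, cuts => cuts
  | (i, ch) :: rest, depth, cuts =>
    if ch = '<' then pvBCuts rest (depth + 1) cuts
    else if ch = '>' then pvBCuts rest (depth - 1) cuts
    else if ch = ',' ∧ depth = 0 then pvBCuts rest depth (cuts ++ [i])
    else pvBCuts rest depth cuts

-- pass 2: slice between consecutive cuts; trailing slice only if non-empty
def pvBBuild (chars : List Char) : List Int → Int → List String → List String
  | [], prev, parts =>
    let tail := String.ofList (PySem.List.slice chars (some (prev + 1)) none)
    if tail = "" then parts else parts ++ [tail]
  | c :: cuts, prev, parts =>
    pvBBuild chars cuts c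
      (parts ++ [String.ofList (PySem.List.slice chars (some (prev + 1)) (some c))])

def split_params_aware_py_alt (args_str : String) : List String :=
  pvBBuild args_str.toList (pvBCuts (PySem.List.enumerate args_str.toList 0) 0 []) (-1) []

-- ===== PRECONDITION & SPEC =====
def Spec_split_params_aware_py (args_str : String) (out : List String) : Prop := out = split_params_aware_py_alt args_str
instance (args_str : String) (out : List String) : Decidable (Spec_split_params_aware_py args_str out) := by unfold Spec_split_params_aware_py; infer_instance

-- ===== CLAIM (what is proved, stated in full; the proofs are below) =====
def Claim_equal_split_params_aware_py : Prop := ∀ (args_str : String), Dom_split_params_aware_py args_str → Spec_split_params_aware_py args_str (split_params_aware_py args_str)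

-- ===== LEMMAS AND PROOFS =====

theorem pvBCuts_acc (l : List (Int × Char)) (d : Int) (acc : List Int) :
    pvBCuts l d acc = acc ++ pvBCuts l d [] := by
  induction l generalizing d acc with
  | nil => simp [pvBCuts]
  | cons p rest ih =>
    obtain ⟨i, ch⟩ := p
    simp only [pvBCuts]
    split_ifs with h1 h2 h3
    · exact ih _ _
    · exact ih _ _
    · rw [ih _ ([] ++ [i]), ih _ (acc ++ [i])]; simp
    · exact ih _ _

theorem pv_main (chars : List Char) : ∀ (l : List Char) (i : ℕ) (d prev : Int)
    (parts : List String), chars.drop i = l → i ≤ chars.length →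
    -1 ≤ prev → prev + 1 ≤ (i : Int) →
    pvALoop l d ((chars.drop (prev + 1).toNat).take (i - (prev + 1).toNat)) parts =
      pvBBuild chars (pvBCuts (PySem.List.enumerate l (i : Int)) d []) prev parts := by
  intro l
  induction l with
  | nil =>
    intro i d prev parts hdrop hi hprev hpi
    have hlen : chars.length ≤ i := by
      by_contra h
      push_neg at h
      have := List.length_drop (l := chars) (i := i)
      rw [hdrop] at this; simp at this; omega
    have hp : (prev + 1).toNat ≤ i := by omega
    have htake : (chars.drop (prev + 1).toNat).take (i - (prev + 1).toNat)
        = chars.drop (prev + 1).toNat := by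
      apply List.take_of_length_le
      simp [List.length_drop]; omega
    rw [htake]
    simp only [PySem.List.enumerate_nil, pvBCuts, pvBBuild, pvALoop]
    rw [PySem.List.slice_from chars (show (0:Int) ≤ prev + 1 by omega)]
    have hmk : (String.ofList (chars.drop (prev + 1).toNat) = "") ↔
        chars.drop (prev + 1).toNat = [] := by
      constructor
      · intro h; have := congrArg String.toList h; simpa using this
      · intro h; simp [h]
    by_cases hc : chars.drop (prev + 1).toNat = []
    · simp [hc]
    · rw [if_neg hc, if_neg (by rw [hmk]; exact hc)]
  | cons ch rest ih =>
    intro i d prev parts hdrop hi hprev hpi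
    have hilt : i < chars.length := by
      by_contra h
      push_neg at h
      rw [List.drop_eq_nil_of_le h] at hdrop; exact (by simp at hdrop)
    have hgi : chars[i] = ch := by
      have h0 := congrArg (fun l => l[0]?) hdrop
      simp [List.getElem?_drop, List.getElem?_eq_getElem hilt] at h0
      exact h0
    have hrest : chars.drop (i + 1) = rest := by
      have := congrArg List.tail hdrop
      simpa [List.tail_drop] using this
    have hp1 : (0:Int) ≤ prev + 1 := by omega
    have hpn : (prev + 1).toNat ≤ i := by omega
    -- extending the buffer by one character = extending the slice by one
    have hext : (chars.drop (prev + 1).toNat).take (i + 1 - (prev + 1).toNat)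
        = (chars.drop (prev + 1).toNat).take (i - (prev + 1).toNat) ++ [ch] := by
      have h1 : i + 1 - (prev + 1).toNat = (i - (prev + 1).toNat) + 1 := by omega
      rw [h1, List.take_succ]
      congr 1
      have : (chars.drop (prev + 1).toNat)[i - (prev + 1).toNat]? = chars[i]? := by
        rw [List.getElem?_drop]; congr 1; omega
      rw [this, List.getElem?_eq_getElem hilt]
      simp [hgi]
    rw [PySem.List.enumerate_cons]
    simp only [pvALoop, pvBCuts]
    split_ifs with h1 h2 h3
    · rw [hext.symm]
      have := ih (i + 1) (d + 1) prev parts hrest (by omega) hprev (by push_cast; omega)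
      simpa [Nat.cast_add] using this
    · rw [hext.symm]
      have := ih (i + 1) (d - 1) prev parts hrest (by omega) hprev (by push_cast; omega)
      simpa [Nat.cast_add] using this
    · -- a top-level comma: cut here
      rw [pvBCuts_acc _ _ ([] ++ [(i : Int)])]
      simp only [List.nil_append, List.cons_append, List.nil_append, pvBBuild]
      have hslice : PySem.List.slice chars (some (prev + 1)) (some (i : Int))
          = (chars.drop (prev + 1).toNat).take (i - (prev + 1).toNat) := by
        rw [PySem.List.slice_toNat chars hp1 (by omega : (0:Int) ≤ (i:Int))]
        have h2' : ((i : Int)).toNat = i := by omega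
        rw [h2']
      rw [hslice]
      have := ih (i + 1) d (i : Int) (parts ++ [String.ofList ((chars.drop (prev + 1).toNat).take (i - (prev + 1).toNat))]) hrest (by omega) (by omega) (by push_cast; omega)
      have hz : (chars.drop ((i : Int) + 1).toNat).take (i + 1 - ((i : Int) + 1).toNat) = [] := by
        have : ((i : Int) + 1).toNat = i + 1 := by omega
        simp [this]
      rw [hz] at this
      simpa [Nat.cast_add] using this
    · rw [hext.symm]
      have := ih (i + 1) d prev parts hrest (by omega) hprev (by push_cast; omega)
      simpa [Nat.cast_add] using this

-- ===== VERDICT (by name: the statement is the Claim_ definition above) =====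
theorem split_params_aware_py_spec : Claim_equal_split_params_aware_py := by
  intro s _
  unfold Spec_split_params_aware_py split_params_aware_py split_params_aware_py_alt
  have := pv_main s.toList s.toList 0 0 (-1) [] (by simp) (by simp) (by norm_num) (by norm_num)
  simpa using this
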